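-- pv_equiv track=rewrite | github.com/Fabricioz01/GestioBD2 | SQLServer/project/code/db_operations.py | crear_funcion_trigger
-- ===== SOURCE A (Python) =====
-- def crear_funcion_trigger(tabla, columnas):
--     columnas_json_insert = ', '.join([f"'{col}', CONVERT(varchar(255), INSERTED.{col})" for col in columnas])
--     columnas_json_update = ', '.join([f"'{col}', CONVERT(varchar(255), INSERTED.{col})" for col in columnas])
--     columnas_json_delete = ', '.join([f"'{col}', CONVERT(varchar(255), DELETED.{col})" for col in columnas])
--
--     return f"""
--     CREATE TRIGGER audit_{tabla}_insert
--     ON {tabla}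
--     AFTER INSERT
--     AS
--     BEGIN
--         INSERT INTO AUDITORIA (NOMBRE_TABLA, USUARIO_DB, ACCION, DESCRIPCION_CAMBIOS)
--         VALUES ('{tabla}', SUSER_SNAME(), 'INSERT', '{{ {columnas_json_insert} }}');
--     END;
--
--     CREATE TRIGGER audit_{tabla}_update
--     ON {tabla}
--     AFTER UPDATE
--     AS
--     BEGIN
--         INSERT INTO AUDITORIA (NOMBRE_TABLA, USUARIO_DB, ACCION, DESCRIPCION_CAMBIOS)
--         VALUES ('{tabla}', SUSER_SNAME(), 'UPDATE', '{{ {columnas_json_update} }}');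
--     END;
--
--     CREATE TRIGGER audit_{tabla}_delete
--     ON {tabla}
--     AFTER DELETE
--     AS
--     BEGIN
--         INSERT INTO AUDITORIA (NOMBRE_TABLA, USUARIO_DB, ACCION, DESCRIPCION_CAMBIOS)
--         VALUES ('{tabla}', SUSER_SNAME(), 'DELETE', '{{ {columnas_json_delete} }}');
--     END;
--     """
-- ===== SOURCE B (Python) =====
-- def crear_funcion_trigger(tabla, columnas):
--     # Build the three trigger blocks from a table of specs instead of one big literal.
--     specs = [("insert", "INSERT", "INSERTED"),
--              ("update", "UPDATE", "INSERTED"),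
--              ("delete", "DELETE", "DELETED")]
--     blocks = []
--     for suffix, event, source in specs:
--         cols = ', '.join("'{0}', CONVERT(varchar(255), {1}.{0})".format(c, source)
--                          for c in columnas)
--         blocks.append(
--             "    CREATE TRIGGER audit_" + tabla + "_" + suffix + "\n"
--             "    ON " + tabla + "\n"
--             "    AFTER " + event + "\n"
--             "    AS\n"
--             "    BEGIN\n"
--             "        INSERT INTO AUDITORIA (NOMBRE_TABLA, USUARIO_DB, ACCION, DESCRIPCION_CAMBIOS)\n"
--             "        VALUES ('" + tabla + "', SUSER_SNAME(), '" + event + "', '{ " + cols + " }');\n"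
--             "    END;\n"
--         )
--     return "\n" + "\n".join(blocks) + "    "
-- ===== Notes on version B (the rewrite author's own statement) =====
-- stated objective: simpler
-- what changed: Replaces the three hard-coded column joins and one giant triple-quoted template by a loop over a list of (suffix, event, source) trigger specs that assembles each block and joins the blocks, producing the identical string.
import Mathlib
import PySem

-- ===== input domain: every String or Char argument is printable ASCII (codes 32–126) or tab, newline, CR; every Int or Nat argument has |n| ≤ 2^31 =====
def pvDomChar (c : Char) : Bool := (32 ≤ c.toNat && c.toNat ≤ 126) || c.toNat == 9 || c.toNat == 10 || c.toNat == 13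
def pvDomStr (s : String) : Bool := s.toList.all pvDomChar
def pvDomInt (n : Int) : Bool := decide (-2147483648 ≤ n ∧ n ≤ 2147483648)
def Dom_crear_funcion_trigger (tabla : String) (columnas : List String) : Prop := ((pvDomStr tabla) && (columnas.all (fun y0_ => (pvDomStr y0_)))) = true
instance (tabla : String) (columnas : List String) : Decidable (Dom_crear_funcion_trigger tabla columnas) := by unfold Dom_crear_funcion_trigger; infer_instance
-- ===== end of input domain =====

-- B builds the three trigger blocks by looping over a list of (suffix, event, source) specs
-- instead of A's three hard-coded joins and one big template: simpler/alternative decomposition, same output.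

-- ===== PORT A =====
def crear_funcion_trigger (tabla : String) (columnas : List String) : String :=
  let columnas_json_insert := PySem.Str.join ", " (columnas.map (fun col => "'" ++ col ++ "', CONVERT(varchar(255), INSERTED." ++ col ++ ")"))
  let columnas_json_update := PySem.Str.join ", " (columnas.map (fun col => "'" ++ col ++ "', CONVERT(varchar(255), INSERTED." ++ col ++ ")"))
  let columnas_json_delete := PySem.Str.join ", " (columnas.map (fun col => "'" ++ col ++ "', CONVERT(varchar(255), DELETED." ++ col ++ ")"))
  "\n    CREATE TRIGGER audit_" ++ tabla ++ "_insert\n    ON " ++ tabla ++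
  "\n    AFTER INSERT\n    AS\n    BEGIN\n        INSERT INTO AUDITORIA (NOMBRE_TABLA, USUARIO_DB, ACCION, DESCRIPCION_CAMBIOS)\n        VALUES ('" ++
  tabla ++ "', SUSER_SNAME(), 'INSERT', '{ " ++ columnas_json_insert ++ " }');\n    END;\n\n    CREATE TRIGGER audit_" ++
  tabla ++ "_update\n    ON " ++ tabla ++
  "\n    AFTER UPDATE\n    AS\n    BEGIN\n        INSERT INTO AUDITORIA (NOMBRE_TABLA, USUARIO_DB, ACCION, DESCRIPCION_CAMBIOS)\n        VALUES ('" ++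
  tabla ++ "', SUSER_SNAME(), 'UPDATE', '{ " ++ columnas_json_update ++ " }');\n    END;\n\n    CREATE TRIGGER audit_" ++
  tabla ++ "_delete\n    ON " ++ tabla ++
  "\n    AFTER DELETE\n    AS\n    BEGIN\n        INSERT INTO AUDITORIA (NOMBRE_TABLA, USUARIO_DB, ACCION, DESCRIPCION_CAMBIOS)\n        VALUES ('" ++
  tabla ++ "', SUSER_SNAME(), 'DELETE', '{ " ++ columnas_json_delete ++ " }');\n    END;\n    "

-- ===== PORT B =====
-- ', '.join of the per-column json pieces for one source table-variable
def pvJoinCols (source : String) (columnas : List String) : String :=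
  PySem.Str.join ", " (columnas.map (fun c => "'" ++ c ++ "', CONVERT(varchar(255), " ++ source ++ "." ++ c ++ ")"))

-- one assembled trigger block for one spec
def pvBlock (tabla : String) (columnas : List String) (spec : String × String × String) : String :=
  let cols := pvJoinCols spec.2.2 columnas
  "    CREATE TRIGGER audit_" ++ tabla ++ "_" ++ spec.1 ++ "\n" ++
  "    ON " ++ tabla ++ "\n" ++
  "    AFTER " ++ spec.2.1 ++ "\n" ++
  "    AS\n" ++
  "    BEGIN\n" ++
  "        INSERT INTO AUDITORIA (NOMBRE_TABLA, USUARIO_DB, ACCION, DESCRIPCION_CAMBIOS)\n" ++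
  "        VALUES ('" ++ tabla ++ "', SUSER_SNAME(), '" ++ spec.2.1 ++ "', '{ " ++ cols ++ " }');\n" ++
  "    END;\n"

def crear_funcion_trigger_alt (tabla : String) (columnas : List String) : String :=
  let specs : List (String × String × String) :=
    [("insert", "INSERT", "INSERTED"), ("update", "UPDATE", "INSERTED"), ("delete", "DELETE", "DELETED")]
  let blocks := specs.foldl (fun acc s => acc ++ [pvBlock tabla columnas s]) []
  "\n" ++ PySem.Str.join "\n" blocks ++ "    "

-- ===== PRECONDITION & SPEC =====
def Spec_crear_funcion_trigger (tabla : String) (columnas : List String) (out : String) : Prop := out = crear_funcion_trigger_alt tabla columnas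
instance (tabla : String) (columnas : List String) (out : String) : Decidable (Spec_crear_funcion_trigger tabla columnas out) := by unfold Spec_crear_funcion_trigger; infer_instance

-- ===== CLAIM (what is proved, stated in full; the proofs are below) =====
def Claim_equal_crear_funcion_trigger : Prop := ∀ (tabla : String) (columnas : List String), Dom_crear_funcion_trigger tabla columnas → Spec_crear_funcion_trigger tabla columnas (crear_funcion_trigger tabla columnas)

-- ===== LEMMAS AND PROOFS =====
theorem pvJoinCols_inserted (columnas : List String) :
    pvJoinCols "INSERTED" columnas =
      PySem.Str.join ", " (columnas.map (fun col => "'" ++ col ++ "', CONVERT(varchar(255), INSERTED." ++ col ++ ")")) := by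
  unfold pvJoinCols
  have hf : (fun c : String => "'" ++ c ++ "', CONVERT(varchar(255), " ++ "INSERTED" ++ "." ++ c ++ ")")
      = (fun col : String => "'" ++ col ++ "', CONVERT(varchar(255), INSERTED." ++ col ++ ")") := by
    funext c; apply String.ext; simp [String.toList_append]
  rw [hf]

theorem pvJoinCols_deleted (columnas : List String) :
    pvJoinCols "DELETED" columnas =
      PySem.Str.join ", " (columnas.map (fun col => "'" ++ col ++ "', CONVERT(varchar(255), DELETED." ++ col ++ ")")) := by
  unfold pvJoinCols
  have hf : (fun c : String => "'" ++ c ++ "', CONVERT(varchar(255), " ++ "DELETED" ++ "." ++ c ++ ")")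
      = (fun col : String => "'" ++ col ++ "', CONVERT(varchar(255), DELETED." ++ col ++ ")") := by
    funext c; apply String.ext; simp [String.toList_append]
  rw [hf]

-- ===== VERDICT (by name: the statement is the Claim_ definition above) =====
set_option maxRecDepth 8192 in
theorem crear_funcion_trigger_spec : Claim_equal_crear_funcion_trigger := by
  intro tabla columnas _
  unfold Spec_crear_funcion_trigger crear_funcion_trigger crear_funcion_trigger_alt pvBlock
  simp only [List.foldl, List.nil_append, List.cons_append,
    pvJoinCols_inserted, pvJoinCols_deleted]
  apply String.ext
  simp [String.toList_append, PySem.Str.join, PySem.Chars.join, List.intercalate, List.intersperse, List.flatten]
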